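-- pv_equiv track=rewrite | github.com/paulscherrerinstitute/std_detector_buffer | std_buffer/eiger/std-daq_config_gen.py | get_columns_total_size
-- ===== SOURCE A (Python) =====
-- def get_columns_total_size(n_columns, initial_size):
--     x_small_gap = 2
--     x_big_gap = 36
--     total_size = initial_size  # Assign to a new variable
--     for column in range(n_columns):
--         if column % 2 == 1 and column < n_columns - 1:
--             total_size += x_big_gap
--         elif column % 2 == 0 and column < n_columns - 1:
--             total_size += x_small_gap
--     return total_size
-- ===== SOURCE B (Python) =====
-- def get_columns_total_size(n_columns, initial_size):
--     if n_columns <= 0: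
--         return initial_size
--     m = n_columns - 1  # columns 0..m-1 each contribute a gap
--     return initial_size + 2 * ((m + 1) // 2) + 36 * (m // 2)
-- ===== Notes on version B (the rewrite author's own statement) =====
-- stated objective: faster
-- what changed: Replaced the per-column loop by a closed-form count of even/odd gap positions in [0, n_columns-2]: 2*ceil(m/2) + 36*floor(m/2) with m = n_columns-1.
import Mathlib
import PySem

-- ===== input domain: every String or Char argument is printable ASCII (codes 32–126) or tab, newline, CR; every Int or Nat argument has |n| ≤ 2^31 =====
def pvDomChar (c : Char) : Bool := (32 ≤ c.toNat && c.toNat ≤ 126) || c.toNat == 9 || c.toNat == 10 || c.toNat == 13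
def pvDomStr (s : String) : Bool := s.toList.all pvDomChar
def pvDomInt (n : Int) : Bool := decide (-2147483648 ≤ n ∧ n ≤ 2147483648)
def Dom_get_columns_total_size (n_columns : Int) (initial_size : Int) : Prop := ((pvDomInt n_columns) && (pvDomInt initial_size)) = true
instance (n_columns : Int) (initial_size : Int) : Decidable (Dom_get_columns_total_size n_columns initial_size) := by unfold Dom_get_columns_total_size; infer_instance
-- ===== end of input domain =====

-- B replaces A's per-column loop by a closed-form count of even/odd gap positions (O(1) instead of O(n)).

-- ===== PORT A =====
def get_columns_total_size (n_columns : Int) (initial_size : Int) : Int :=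
  let x_small_gap : Int := 2
  let x_big_gap : Int := 36
  (PySem.List.pyRange 0 n_columns 1).foldl
    (fun total_size column =>
      if PySem.Int.mod column 2 = 1 ∧ column < n_columns - 1 then total_size + x_big_gap
      else if PySem.Int.mod column 2 = 0 ∧ column < n_columns - 1 then total_size + x_small_gap
      else total_size)
    initial_size

-- ===== PORT B =====
def get_columns_total_size_alt (n_columns : Int) (initial_size : Int) : Int :=
  if n_columns ≤ 0 then initial_size
  else
    let m := n_columns - 1
    initial_size + 2 * PySem.Int.floordiv (m + 1) 2 + 36 * PySem.Int.floordiv m 2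

-- ===== PRECONDITION & SPEC =====
def Spec_get_columns_total_size (n_columns : Int) (initial_size : Int) (out : Int) : Prop := out = get_columns_total_size_alt n_columns initial_size
instance (n_columns : Int) (initial_size : Int) (out : Int) : Decidable (Spec_get_columns_total_size n_columns initial_size out) := by unfold Spec_get_columns_total_size; infer_instance

-- ===== CLAIM (what is proved, stated in full; the proofs are below) =====
def Claim_equal_get_columns_total_size : Prop := ∀ (n_columns : Int) (initial_size : Int), Dom_get_columns_total_size n_columns initial_size → Spec_get_columns_total_size n_columns initial_size (get_columns_total_size n_columns initial_size)

-- ===== LEMMAS AND PROOFS =====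

-- parity-only fold over range(k): closed form
theorem pvGapsFold (k : Nat) (init : Int) :
    (PySem.List.pyRange 0 k 1).foldl
      (fun total c => if PySem.Int.mod c 2 = 1 then total + 36 else total + 2) init
    = init + 2 * ((k + 1) / 2 : Nat) + 36 * ((k / 2 : Nat)) := by
  induction k generalizing init with
  | zero => simp
  | succ k ih =>
    have hsplit : PySem.List.pyRange 0 ((k + 1 : Nat) : Int) 1
        = PySem.List.pyRange 0 (k : Int) 1 ++ [(k : Int)] := by
      have := PySem.List.pyRange_one_succ_right (a := 0) (b := (k : Int)) (by positivity)
      push_cast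
      exact this
    rw [hsplit, List.foldl_append, ih]
    simp only [List.foldl]
    rcases Nat.even_or_odd k with he | ho
    · obtain ⟨j, hj⟩ := he
      have hm : PySem.Int.mod (k : Int) 2 = 0 := by
        rw [PySem.Int.mod_eq_emod_of_pos (a := (k : Int)) (b := 2) (by norm_num)]; omega
      rw [if_neg (by rw [hm]; norm_num)]
      subst hj; push_cast; omega
    · obtain ⟨j, hj⟩ := ho
      have hm : PySem.Int.mod (k : Int) 2 = 1 := by
        rw [PySem.Int.mod_eq_emod_of_pos (a := (k : Int)) (b := 2) (by norm_num)]; omega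
      rw [if_pos hm]
      subst hj; push_cast; omega

-- ===== VERDICT (by name: the statement is the Claim_ definition above) =====
theorem get_columns_total_size_spec : Claim_equal_get_columns_total_size := by
  intro n init _
  unfold Spec_get_columns_total_size get_columns_total_size get_columns_total_size_alt
  by_cases hn : n ≤ 0
  · rw [if_pos hn, PySem.List.pyRange_one_eq_nil (by omega)]
    simp
  · rw [if_neg hn]
    -- split range(n) into range(n-1) ++ [n-1]; the last column adds nothing
    have hsplit : PySem.List.pyRange 0 n 1
        = PySem.List.pyRange 0 (n - 1) 1 ++ [n - 1] := by
      have := PySem.List.pyRange_one_succ_right (a := 0) (b := n - 1) (by omega)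
      simpa using this
    rw [hsplit, List.foldl_append]
    simp only [List.foldl]
    rw [if_neg (by omega), if_neg (by omega)]
    -- over range(n-1), every column is < n-1: reduce to the parity-only fold
    set m : Nat := (n - 1).toNat with hm
    have hmn : (m : Int) = n - 1 := by omega
    rw [← hmn]
    have hcongr := PySem.List.foldl_congr_mem
      (l := PySem.List.pyRange 0 (m : Int) 1) (init := init)
      (f := fun total_size column =>
        if PySem.Int.mod column 2 = 1 ∧ column < (m : Int) then total_size + 36
        else if PySem.Int.mod column 2 = 0 ∧ column < (m : Int) then total_size + 2
        else total_size)
      (g := fun total c => if PySem.Int.mod c 2 = 1 then total + 36 else total + 2)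
      (by
        intro acc x hx
        rw [PySem.List.mem_pyRange_one] at hx
        have h2 := PySem.Int.mod_eq_emod_of_pos (a := x) (b := 2) (by norm_num)
        simp only [h2]
        split_ifs <;> omega)
    rw [hcongr]
    rw [pvGapsFold]
    have h1 : PySem.Int.floordiv ((m : Int) + 1) 2 = (((m + 1) / 2 : Nat) : Int) := by
      have := PySem.Int.floordiv_natCast (m + 1) 2
      push_cast at this ⊢; omega
    have h2 : PySem.Int.floordiv (m : Int) 2 = ((m / 2 : Nat) : Int) := by
      exact_mod_cast PySem.Int.floordiv_natCast m 2
    rw [h1, h2]
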